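-- pv_equiv track=rewrite | github.com/traaug/Python-practice | comment_remover.py | comment_remover
-- ===== SOURCE A (Python) =====
-- def comment_remover(str):
--     sentence_list = str.split('\n')
--     final_list = []
--     for sentence in sentence_list:
--         if "#" in sentence:
--             comment_index = sentence.index('#')
--             final_list.append(sentence[:comment_index])
--         else:
--             final_list.append(sentence)
--     return '\n'.join(final_list)
-- ===== SOURCE B (Python) =====
-- import re
--
-- def comment_remover(str):
--     return re.sub(r'#[^\n]*', '', str)
-- ===== Notes on version B (the rewrite author's own statement) =====
-- stated objective: idiomatic
-- what changed: Replaces the split/branch/slice/join loop with a single regex substitution that deletes each '#' and the rest of its line in one pass over the string.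
import Mathlib
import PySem

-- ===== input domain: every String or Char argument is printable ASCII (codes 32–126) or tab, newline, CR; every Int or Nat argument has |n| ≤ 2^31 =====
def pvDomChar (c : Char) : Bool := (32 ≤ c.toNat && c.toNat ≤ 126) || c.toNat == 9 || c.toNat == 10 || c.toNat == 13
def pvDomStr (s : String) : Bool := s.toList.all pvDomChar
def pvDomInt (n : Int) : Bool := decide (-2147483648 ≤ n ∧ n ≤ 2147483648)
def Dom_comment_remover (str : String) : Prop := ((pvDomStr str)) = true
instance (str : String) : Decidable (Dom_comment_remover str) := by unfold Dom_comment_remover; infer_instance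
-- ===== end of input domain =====

-- B replaces A's split/branch/slice/join loop by a single regex substitution (re.sub(r'#[^\n]*', '')
-- in Python; ported by hand as the equivalent one-pass scanner), for idiomatic/simpler code; same cost.

-- ===== PORT A =====
-- str.split('\n'): sep is the non-empty literal "\n", so PySem.Str.split? is `some`; getD never takes the default.
-- sentence.index('#') is guarded by `"#" in sentence`, so it equals PySem.Str.find (no ValueError reachable).
def comment_remover (str : String) : String :=
  PySem.Str.join "\n"
    (((PySem.Str.split? str "\n").getD []).foldl (fun acc sentence =>
      if PySem.Str.isIn "#" sentence then
        acc ++ [PySem.Str.slice sentence none (some (PySem.Str.find sentence "#"))]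
      else acc ++ [sentence]) ([] : List String))

-- ===== PORT B =====
-- Hand port of re.sub(r'#[^\n]*', '', str): one left-to-right scan; at '#' drop everything up to
-- (not including) the next newline and continue; exact because the pattern cannot match across '\n'
-- and matches are leftmost. pvQ c = "c is not a newline".
def pvQ (c : Char) : Bool := c ≠ '\n'

def pvRemoveComments : List Char → List Char
  | [] => []
  | c :: rest =>
    if c = '#' then pvRemoveComments (rest.dropWhile pvQ)
    else c :: pvRemoveComments rest
termination_by l => l.length
decreasing_by
  · have := List.length_dropWhile_le pvQ rest
    simp only [List.length_cons]
    omega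
  · simp

def comment_remover_alt (str : String) : String :=
  String.ofList (pvRemoveComments str.toList)

-- ===== PRECONDITION & SPEC =====
def Spec_comment_remover (str : String) (out : String) : Prop := out = comment_remover_alt str
instance (str : String) (out : String) : Decidable (Spec_comment_remover str out) := by unfold Spec_comment_remover; infer_instance

-- ===== CLAIM (what is proved, stated in full; the proofs are below) =====
def Claim_equal_comment_remover : Prop := ∀ (str : String), Dom_comment_remover str → Spec_comment_remover str (comment_remover str)

-- ===== LEMMAS AND PROOFS =====

-- pvP c = "c is not a hash": the per-line keep-predicate.
def pvP (c : Char) : Bool := c ≠ '#'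

-- A's per-line transformation, at the character-list level.
def pvClean (l : List Char) : List Char :=
  if PySem.Chars.isIn ['#'] l then
    PySem.Chars.slice l none (some (PySem.Chars.find l ['#']))
  else l

-- Functional model of PySem.Chars.splitOn on the single-character separator '\n'.
def pvSplit (pre : List Char) : List Char → List (List Char)
  | [] => [pre]
  | c :: rest => if c = '\n' then pre :: pvSplit [] rest else pvSplit (pre ++ [c]) rest

theorem pvSplit_ne_nil (pre cs : List Char) : pvSplit pre cs ≠ [] := by
  induction cs generalizing pre with
  | nil => simp [pvSplit]
  | cons c rest ih => by_cases h : c = '\n' <;> simp [pvSplit, h, ih]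

theorem pvGo_spec (cs : List Char) : ∀ (fuel : Nat), cs.length < fuel → ∀ (cur : List Char) (done : List (List Char)),
    PySem.Chars.splitOn.go ['\n'] fuel cs cur done = done.reverse ++ pvSplit cur.reverse cs := by
  induction cs with
  | nil =>
    intro fuel hf cur done
    cases fuel with
    | zero => omega
    | succ f => simp [PySem.Chars.splitOn.go, pvSplit]
  | cons c rest ih =>
    intro fuel hf cur done
    cases fuel with
    | zero => omega
    | succ f =>
      by_cases h : c = '\n'
      · subst h
        simp only [PySem.Chars.splitOn.go]
        rw [if_pos (by simp)]
        simp only [List.length_cons] at hf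
        rw [show List.drop (['\n'] : List Char).length ('\n' :: rest) = rest from rfl]
        rw [ih f (by omega) [] (cur.reverse :: done)]
        simp [pvSplit]
      · simp only [PySem.Chars.splitOn.go]
        rw [if_neg (by simp [Ne.symm h])]
        simp only [List.length_cons] at hf
        rw [ih f (by omega) (c :: cur) done]
        simp [pvSplit, h]

theorem pvSplitOn_eq (cs : List Char) : PySem.Chars.splitOn cs ['\n'] = pvSplit [] cs := by
  simpa using pvGo_spec cs (cs.length + 1) (by omega) [] []

theorem pvPrefix_drop_iff (s : List Char) (j : Nat) : (['#'] <+: s.drop j) ↔ s[j]? = some '#' := by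
  constructor
  · rintro ⟨t, ht⟩
    have : (s.drop j)[0]? = some '#' := by rw [← ht]; rfl
    simpa [List.getElem?_drop] using this
  · intro h
    refine ⟨(s.drop j).tail, ?_⟩
    have h0 : (s.drop j)[0]? = some '#' := by simpa [List.getElem?_drop] using h
    cases hd : s.drop j with
    | nil => simp [hd] at h0
    | cons a t => simp [hd] at h0 ⊢; simp [h0]

theorem pvTake_eq_takeWhile (s : List Char) (j : Nat) (h : s[j]? = some '#')
    (hmin : ∀ i < j, s[i]? ≠ some '#') : s.take j = s.takeWhile pvP := by
  induction s generalizing j with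
  | nil => simp at h
  | cons a t ih =>
    cases j with
    | zero =>
      simp at h
      simp [pvP, h]
    | succ j =>
      have ha : a ≠ '#' := by
        intro e; exact hmin 0 (Nat.succ_pos _) (by simp [e])
      rw [List.takeWhile_cons, show pvP a = true by simp [pvP, ha]]
      simp [ih j (by simpa using h) (fun i hi => by
        have := hmin (i + 1) (by omega); simpa using this)]

theorem pvTakeWhile_eq_self (l : List Char) (h : '#' ∉ l) : l.takeWhile pvP = l := by
  rw [List.takeWhile_eq_self_iff]
  intro x hx
  simp only [pvP, ne_eq, decide_eq_true_eq]
  rintro rfl; exact h hx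

theorem pvClean_eq_takeWhile (l : List Char) : pvClean l = l.takeWhile pvP := by
  unfold pvClean
  by_cases h : PySem.Chars.isIn ['#'] l
  · rw [if_pos h]
    have hmem : ['#'] <:+: l := (PySem.Chars.isIn_iff_infix _ _).mp h
    have hpos : 0 ≤ PySem.Chars.find l ['#'] := (PySem.Chars.find_nonneg_iff _ _).mpr hmem
    rw [PySem.Chars.slice_eq_listSlice, PySem.List.slice_to _ hpos]
    obtain ⟨hpre, hfirst⟩ := PySem.Chars.find_spec (s := l) (sub := ['#']) hpos
    exact pvTake_eq_takeWhile l _ ((pvPrefix_drop_iff _ _).mp hpre)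
      (fun i hi hc => hfirst i hi ((pvPrefix_drop_iff _ _).mpr hc))
  · rw [if_neg h]
    exact (pvTakeWhile_eq_self l (fun hc =>
      h ((PySem.Chars.isIn_iff_infix _ _).mpr ((List.singleton_infix_iff '#' l).mpr hc)))).symm

theorem pvTakeWhile_append_of_hash (pre : List Char) (l : List Char) (hp : '#' ∈ pre) :
    (pre ++ l).takeWhile pvP = pre.takeWhile pvP := by
  rw [List.takeWhile_append]
  split
  · next hall =>
    exfalso
    have heq : pre.takeWhile pvP = pre := (List.takeWhile_prefix pvP).eq_of_length hall
    have : pvP '#' = true := List.mem_takeWhile_imp (heq ▸ hp)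
    simp [pvP] at this
  · rfl

-- Main invariant: joining the cleaned pieces of pvSplit equals the one-pass scanner's output,
-- `pre` being the part of the current line already read.
theorem pvMain (cs : List Char) : ∀ pre : List Char,
    PySem.Chars.join ['\n'] ((pvSplit pre cs).map (List.takeWhile pvP)) =
      pre.takeWhile pvP ++
        (if '#' ∈ pre then pvRemoveComments (cs.dropWhile pvQ) else pvRemoveComments cs) := by
  induction cs with
  | nil =>
    intro pre
    rw [show pvSplit pre [] = [pre] from rfl]
    rw [List.map_singleton, PySem.Chars.join_singleton]
    have hrc : pvRemoveComments [] = [] := by rw [pvRemoveComments]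
    simp [hrc]
  | cons c rest ih =>
    intro pre
    by_cases h : c = '\n'
    · subst h
      rw [show pvSplit pre ('\n' :: rest) = pre :: pvSplit [] rest from by rw [pvSplit, if_pos rfl]]
      have hne : (pvSplit ([] : List Char) rest).map (List.takeWhile pvP) ≠ [] := by
        simp [pvSplit_ne_nil]
      obtain ⟨b, l', hbl⟩ := List.exists_cons_of_ne_nil hne
      rw [List.map_cons, hbl, PySem.Chars.join_cons_cons, ← hbl, ih []]
      have hrc : pvRemoveComments ('\n' :: rest) = '\n' :: pvRemoveComments rest := by
        rw [pvRemoveComments]; simp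
      have hdw : ('\n' :: rest).dropWhile pvQ = '\n' :: rest := by
        rw [List.dropWhile_cons, show pvQ '\n' = false by simp [pvQ]]; simp
      by_cases hp : '#' ∈ pre <;>
        simp [hp, hdw, hrc, List.takeWhile_nil]
    · rw [show pvSplit pre (c :: rest) = pvSplit (pre ++ [c]) rest from by rw [pvSplit, if_neg h]]
      rw [ih (pre ++ [c])]
      by_cases hp : '#' ∈ pre
      · rw [pvTakeWhile_append_of_hash pre [c] hp]
        have hdw : (c :: rest).dropWhile pvQ = rest.dropWhile pvQ := by
          rw [List.dropWhile_cons, if_pos (show pvQ c = true by simp [pvQ, h])]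
        simp [hp, hdw, List.mem_append]
      · have h2 : pre.takeWhile pvP = pre := pvTakeWhile_eq_self pre hp
        by_cases hc : c = '#'
        · subst hc
          have h1 : (pre ++ ['#']).takeWhile pvP = pre := by
            have htw : List.takeWhile pvP ['#'] = [] := by
              rw [List.takeWhile_cons, if_neg (show ¬pvP '#' = true by simp [pvP])]
            rw [List.takeWhile_append]
            split
            · rw [htw]; simp
            · exact h2
          have hrc : pvRemoveComments ('#' :: rest) = pvRemoveComments (rest.dropWhile pvQ) := by
            rw [pvRemoveComments]; simp
          simp [h1, h2, hp, hrc]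
        · have h1 : (pre ++ [c]).takeWhile pvP = pre ++ [c] := by
            apply pvTakeWhile_eq_self
            intro hx
            rcases List.mem_append.mp hx with h' | h'
            · exact hp h'
            · have : '#' = c := by simpa using h'
              exact hc this.symm
          have hrc : pvRemoveComments (c :: rest) = c :: pvRemoveComments rest := by
            rw [pvRemoveComments]; simp [hc]
          have hc' : ¬('#' = c) := fun e => hc e.symm
          simp [h1, h2, hp, hc', hrc, List.mem_append]

-- ===== VERDICT (by name: the statement is the Claim_ definition above) =====
theorem comment_remover_spec : Claim_equal_comment_remover := by
  intro str _
  unfold Spec_comment_remover comment_remover comment_remover_alt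
  have hsplit : (PySem.Str.split? str "\n").getD [] =
      (pvSplit [] str.toList).map String.ofList := by
    simp [PySem.Str.split?, PySem.Chars.split?, pvSplitOn_eq]
  rw [hsplit]
  have hfold : ∀ (init ls : List String),
      ls.foldl (fun acc sentence =>
        if PySem.Str.isIn "#" sentence then
          acc ++ [PySem.Str.slice sentence none (some (PySem.Str.find sentence "#"))]
        else acc ++ [sentence]) init =
      init ++ ls.map (fun sentence =>
        if PySem.Str.isIn "#" sentence then
          PySem.Str.slice sentence none (some (PySem.Str.find sentence "#"))
        else sentence) := by
    intro init ls
    rw [← PySem.List.foldl_append_singleton_eq_map]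
    apply PySem.List.foldl_congr_mem
    intro acc x _
    split <;> rfl
  rw [hfold]
  simp only [List.nil_append, List.map_map]
  have hclean : ∀ l : List Char,
      ((fun sentence =>
        if PySem.Str.isIn "#" sentence then
          PySem.Str.slice sentence none (some (PySem.Str.find sentence "#"))
        else sentence) ∘ String.ofList) l = String.ofList (pvClean l) := by
    intro l
    simp only [Function.comp, PySem.Str.isIn, PySem.Str.slice, PySem.Str.find, pvClean,
      String.toList_ofList]
    split <;> simp_all
  rw [List.map_congr_left (fun l _ => hclean l)]
  rw [PySem.Str.join]
  congr 1
  rw [List.map_map]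
  rw [show (String.toList ∘ fun l => String.ofList (pvClean l)) = pvClean from by
    funext l; simp [Function.comp, String.toList_ofList]]
  rw [show (pvClean : List Char → List Char) = List.takeWhile pvP from funext pvClean_eq_takeWhile]
  rw [show ("\n" : String).toList = ['\n'] from rfl]
  rw [pvMain str.toList []]
  simp
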